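-- pv_equiv track=rewrite | github.com/jrodriguezgar/FormuLite | shortfx/fxPython/py_operations.py | wrap_rows
-- ===== SOURCE A (Python) =====
-- from typing import Any, List, Optional, Set, Tuple, Union
--
-- def wrap_rows(
--     vector: list[Any],
--     wrap_count: int,
--     pad_with: Any = None,
-- ) -> list[list[Any]]:
--     """Wraps a 1-D vector into a 2-D array by rows.
--
--     Description:
--         Splits a flat list into rows of *wrap_count* elements.
--         The last row is padded with *pad_with* if needed.
--         Equivalent to Excel WRAPROWS.
--
--     Args:
--         vector: Flat list of values.
--         wrap_count: Number of elements per row (>= 1).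
--         pad_with: Value used to pad the last incomplete row.
--
--     Returns:
--         list[list[Any]]: A 2-D array.
--
--     Raises:
--         ValueError: If wrap_count < 1.
--
--     Example:
--         >>> wrap_rows([1, 2, 3, 4, 5], 2)
--         [[1, 2], [3, 4], [5, None]]
--         >>> wrap_rows([1, 2, 3, 4], 2)
--         [[1, 2], [3, 4]]
--
--     Complexity: O(n)
--     """
--     if wrap_count < 1:
--         raise ValueError("wrap_count must be >= 1.")
--
--     result = []
--
--     for i in range(0, len(vector), wrap_count):
--         chunk = vector[i:i + wrap_count]
--
--         while len(chunk) < wrap_count: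
--             chunk.append(pad_with)
--
--         result.append(chunk)
--
--     return result
-- ===== SOURCE B (Python) =====
-- def wrap_rows(vector, wrap_count, pad_with=None):
--     if wrap_count < 1:
--         raise ValueError("wrap_count must be >= 1.")
--     pad = (wrap_count - len(vector) % wrap_count) % wrap_count
--     padded = vector + [pad_with] * pad
--     return [padded[i:i + wrap_count] for i in range(0, len(padded), wrap_count)]
-- ===== Notes on version B (the rewrite author's own statement) =====
-- stated objective: simpler
-- what changed: A pads each short chunk with an inner while-loop inside the slicing loop; B precomputes the padding amount with a double modulo, builds one padded list up front, and slices it uniformly in a single comprehension with no inner padding loop.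
-- outside the precondition, e.g. on wrap_rows([1], 2, None): A returns [[1, None]], B returns [[1, None]]
import Mathlib
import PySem

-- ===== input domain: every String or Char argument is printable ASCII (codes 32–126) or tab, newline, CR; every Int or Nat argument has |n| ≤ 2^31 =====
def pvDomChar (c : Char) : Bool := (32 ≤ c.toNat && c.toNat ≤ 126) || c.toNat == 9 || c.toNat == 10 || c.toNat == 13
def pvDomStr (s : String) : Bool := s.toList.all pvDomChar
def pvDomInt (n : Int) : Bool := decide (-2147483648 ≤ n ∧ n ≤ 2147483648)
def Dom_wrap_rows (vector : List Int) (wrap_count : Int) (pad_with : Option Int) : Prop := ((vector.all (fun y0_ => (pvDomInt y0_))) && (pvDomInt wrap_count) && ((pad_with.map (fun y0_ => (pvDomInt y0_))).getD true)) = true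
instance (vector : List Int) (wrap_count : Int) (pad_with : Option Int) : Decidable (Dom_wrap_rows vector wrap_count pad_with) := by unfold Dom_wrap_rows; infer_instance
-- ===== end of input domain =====

-- B replaces A's inner while-loop padding of each chunk by one precomputed padded list
-- sliced uniformly (simpler decomposition); equivalence proved on Pre_ (wrap_count ≥ 1,
-- and pad_with present whenever padding is needed).


-- ===== PORT A =====
-- the inner `while len(chunk) < wrap_count: chunk.append(pad_with)` loop;
-- under Pre_ the pad value is `pad_with.getD 0` is only reached with pad_with = some _ (exact there)
def padWhile (chunk : List Int) (w : Int) (p : Int) : List Int :=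
  if (chunk.length : Int) < w then padWhile (chunk ++ [p]) w p else chunk
termination_by w.toNat - chunk.length
decreasing_by simp; omega

def wrap_rows (vector : List Int) (wrap_count : Int) (pad_with : Option Int) : List (List Int) :=
  if wrap_count < 1 then []   -- Python raises ValueError here; excluded by Pre_
  else
    (PySem.List.pyRange 0 (vector.length : Int) wrap_count).foldl
      (fun result i =>
        let chunk := PySem.List.slice vector (some i) (some (i + wrap_count))
        result ++ [padWhile chunk wrap_count (pad_with.getD 0)]) []

-- ===== PORT B =====
def wrap_rows_alt (vector : List Int) (wrap_count : Int) (pad_with : Option Int) : List (List Int) :=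
  if wrap_count < 1 then []   -- Python raises ValueError here; excluded by Pre_
  else
    let pad := PySem.Int.mod (wrap_count - PySem.Int.mod (vector.length : Int) wrap_count) wrap_count
    let padded := vector ++ List.replicate pad.toNat (pad_with.getD 0)
    (PySem.List.pyRange 0 (padded.length : Int) wrap_count).map
      (fun i => PySem.List.slice padded (some i) (some (i + wrap_count)))

-- ===== PRECONDITION & SPEC =====
-- Pre_ excludes wrap_count < 1 (A raises ValueError) and the inputs where pad_with is None
-- while the last row needs padding: there A returns rows containing None, which is not a
-- value of the declared List (List Int) type.
def Pre_wrap_rows (vector : List Int) (wrap_count : Int) (pad_with : Option Int) : Prop :=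
  1 ≤ wrap_count ∧ (pad_with = none → (vector.length : Int) % wrap_count = 0)
instance (vector : List Int) (wrap_count : Int) (pad_with : Option Int) : Decidable (Pre_wrap_rows vector wrap_count pad_with) := by unfold Pre_wrap_rows; infer_instance
def pvWitness_wrap_rows : List Int × Int × Option Int := ([1, 2, 3], 2, some 0)

def Spec_wrap_rows (vector : List Int) (wrap_count : Int) (pad_with : Option Int) (out : List (List Int)) : Prop := out = wrap_rows_alt vector wrap_count pad_with
instance (vector : List Int) (wrap_count : Int) (pad_with : Option Int) (out : List (List Int)) : Decidable (Spec_wrap_rows vector wrap_count pad_with out) := by unfold Spec_wrap_rows; infer_instance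

-- ===== CLAIM (what is proved, stated in full; the proofs are below) =====
def Claim_equal_wrap_rows : Prop := ∀ (vector : List Int) (wrap_count : Int) (pad_with : Option Int), Dom_wrap_rows vector wrap_count pad_with → Pre_wrap_rows vector wrap_count pad_with → Spec_wrap_rows vector wrap_count pad_with (wrap_rows vector wrap_count pad_with)

-- ===== LEMMAS AND PROOFS =====

-- range with positive step: nil and cons forms
lemma pyRange_pos_nil (a b s : Int) (hs : 0 < s) (hab : b ≤ a) :
    PySem.List.pyRange a b s = [] := by
  rw [PySem.List.pyRange_of_pos a b hs]
  simp [not_lt.mpr hab]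

lemma pyRange_pos_cons (a b s : Int) (hs : 0 < s) (hab : a < b) :
    PySem.List.pyRange a b s = a :: PySem.List.pyRange (a + s) b s := by
  rw [PySem.List.pyRange_of_pos a b hs, PySem.List.pyRange_of_pos (a + s) b hs]
  have key : b - a + s - 1 = (b - a - 1) + 1 * s := by ring
  have h1 : (b - a + s - 1) / s = (b - a - 1) / s + 1 := by
    rw [key, Int.add_mul_ediv_right _ _ (by omega : s ≠ 0)]
  have hnn : 0 ≤ (b - a - 1) / s := Int.ediv_nonneg (by omega) (by omega)
  by_cases h2 : a + s < b
  · have : b - (a + s) + s - 1 = b - a - 1 := by ring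
    rw [if_pos hab, if_pos h2, this, h1]
    have : ((b - a - 1) / s + 1).toNat = ((b - a - 1) / s).toNat + 1 := by omega
    rw [this, List.range_succ_eq_map]
    simp only [List.map_cons, List.map_map]
    congr 1
    · simp
    · refine List.map_congr_left fun k _ => ?_
      simp only [Function.comp]
      push_cast
      ring
  · have h0 : (b - a - 1) / s = 0 := by
      apply Int.ediv_eq_zero_of_lt (by omega) (by omega)
    rw [if_pos hab, if_neg h2, h1, h0]
    simp

-- closed form of the while-loop padding
lemma padWhile_eq (chunk : List Int) (w : Int) (p : Int) :
    padWhile chunk w p = chunk ++ List.replicate (w.toNat - chunk.length) p := by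
  fun_induction padWhile chunk w p with
  | case1 chunk hlt ih =>
      rw [ih]
      have h1 : chunk.length < w.toNat := by omega
      have h2 : w.toNat - (chunk ++ [p]).length + 1 = w.toNat - chunk.length := by
        simp; omega
      rw [List.append_assoc]
      congr 1
      rw [← h2]
      simp [List.replicate_succ]
  | case2 chunk hge =>
      have : w.toNat - chunk.length = 0 := by omega
      simp [this]

-- canonical chunking used only by the proofs: apply g to each length-w window
def chunksG (g : List Int → List Int) : List Int → Nat → List (List Int)
  | [], _ => []
  | x :: xs, w => g ((x :: xs).take w) :: chunksG g (xs.drop (w - 1)) w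
termination_by l _ => l.length
decreasing_by simp

lemma chunksG_cons (g : List Int → List Int) (l : List Int) (w : Nat) (hw : 1 ≤ w) (hl : l ≠ []) :
    chunksG g l w = g (l.take w) :: chunksG g (l.drop w) w := by
  cases l with
  | nil => exact absurd rfl hl
  | cons x xs =>
      show _ = g ((x :: xs).take w) :: chunksG g ((x :: xs).drop w) w
      have : (x :: xs).drop w = xs.drop (w - 1) := by
        obtain ⟨w', rfl⟩ := Nat.exists_eq_add_of_le hw
        simp [Nat.add_comm]
      rw [this]
      conv_lhs => unfold chunksG

-- both loops over range(0, len, w) compute chunksG of the dropped suffix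
lemma map_slice_eq_chunksG (g : List Int → List Int) (V : List Int) (w : Int) (hw : 1 ≤ w) :
    ∀ (a : Int), 0 ≤ a →
      (PySem.List.pyRange a (V.length : Int) w).map
          (fun i => g (PySem.List.slice V (some i) (some (i + w))))
        = chunksG g (V.drop a.toNat) w.toNat := by
  intro a ha
  by_cases hab : a < (V.length : Int)
  · have hlen : a.toNat < V.length := by omega
    rw [pyRange_pos_cons a _ w (by omega) hab, List.map_cons]
    have hdrop_ne : V.drop a.toNat ≠ [] := by
      simp [List.drop_eq_nil_iff]; omega
    rw [chunksG_cons g _ _ (by omega) hdrop_ne]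
    have hslice : PySem.List.slice V (some a) (some (a + w)) = (V.drop a.toNat).take w.toNat := by
      rw [PySem.List.slice_toNat V ha (by omega)]
      congr 1
      omega
    have htail : (V.drop a.toNat).drop w.toNat = V.drop (a + w).toNat := by
      rw [List.drop_drop]
      congr 1
      omega
    rw [hslice, map_slice_eq_chunksG g V w hw (a + w) (by omega), htail]
  · rw [pyRange_pos_nil a _ w (by omega) (by omega)]
    have : V.drop a.toNat = [] := by
      simp [List.drop_eq_nil_iff]; omega
    rw [this]
    conv_rhs => unfold chunksG
    simp
termination_by a => V.length - a.toNat
decreasing_by omega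

-- padding-per-chunk equals padding once up front
lemma chunksG_pad_eq_raw (p : Int) (w : Nat) (hw : 1 ≤ w) :
    ∀ (v : List Int),
      chunksG (fun c => c ++ List.replicate (w - c.length) p) v w
        = chunksG id (v ++ List.replicate ((w - v.length % w) % w) p) w := by
  intro v
  cases hv : v with
  | nil =>
    conv_lhs => unfold chunksG
    conv_rhs => unfold chunksG
    simp
  | cons x xs =>
    have hvne : v ≠ [] := by simp [hv]
    rw [← hv]
    set L := v.length with hL
    have hL1 : 1 ≤ L := by
      rw [hL, hv]; simp
    by_cases hlt : L < w
    · -- single (short) final chunk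
      have hmod : (w - L % w) % w = w - L := by
        rw [Nat.mod_eq_of_lt hlt, Nat.mod_eq_of_lt (by omega)]
      rw [hmod]
      have hne2 : v ++ List.replicate (w - L) p ≠ [] := by simp [hvne]
      rw [chunksG_cons _ v w hw hvne, chunksG_cons id _ w hw hne2]
      have hlenfull : (v ++ List.replicate (w - L) p).length = w := by simp [← hL]; omega
      have htake : (v ++ List.replicate (w - L) p).take w = v ++ List.replicate (w - L) p := by
        rw [List.take_of_length_le (by omega)]
      have hdropv : v.drop w = [] := by simp [List.drop_eq_nil_iff]; omega
      have hdrop : (v ++ List.replicate (w - L) p).drop w = [] := by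
        simp [List.drop_eq_nil_iff]; omega
      rw [htake, hdropv, hdrop]
      have htakev : v.take w = v := List.take_of_length_le (by omega)
      conv_lhs => rw [htakev]
      conv_lhs => unfold chunksG
      conv_rhs => unfold chunksG
      simp [← hL]
    · -- full leading chunk, recurse on the rest
      have hwle : w ≤ L := by omega
      have hmod : L % w = (L - w) % w := by
        conv_lhs => rw [← Nat.sub_add_cancel hwle]
        rw [Nat.add_mod_right]
      set R := List.replicate ((w - L % w) % w) p with hR
      have hne2 : v ++ R ≠ [] := by simp [hvne]
      rw [chunksG_cons _ v w hw hvne, chunksG_cons id _ w hw hne2]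
      have htake : (v ++ R).take w = v.take w := List.take_append_of_le_length (by omega)
      have hdrop : (v ++ R).drop w = v.drop w ++ R := List.drop_append_of_le_length (by omega)
      have hpad : w - (v.take w).length = 0 := by simp [← hL]; omega
      have hrec := chunksG_pad_eq_raw p w hw (v.drop w)
      have hlend : (v.drop w).length = L - w := by simp [← hL]
      rw [htake, hdrop, hpad]
      simp only [List.replicate_zero, List.append_nil, id]
      refine congrArg₂ _ rfl ?_
      rw [hrec, hlend, ← hmod, ← hR]
termination_by v => v.length
decreasing_by simp [*]

-- A's foldl, flattened to a map (library loop shape), for wrap_count ≥ 1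
lemma wrap_rows_eq (vector : List Int) (wrap_count : Int) (pad_with : Option Int)
    (hw : 1 ≤ wrap_count) :
    wrap_rows vector wrap_count pad_with
      = chunksG (fun c => c ++ List.replicate (wrap_count.toNat - c.length) (pad_with.getD 0))
          vector wrap_count.toNat := by
  unfold wrap_rows
  rw [if_neg (by omega)]
  rw [PySem.List.foldl_append_singleton_eq_map]
  simp only [padWhile_eq]
  have := map_slice_eq_chunksG
      (fun c => c ++ List.replicate (wrap_count.toNat - c.length) (pad_with.getD 0))
      vector wrap_count hw 0 le_rfl
  simpa using this

lemma wrap_rows_alt_eq (vector : List Int) (wrap_count : Int) (pad_with : Option Int)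
    (hw : 1 ≤ wrap_count) :
    wrap_rows_alt vector wrap_count pad_with
      = chunksG id
          (vector ++ List.replicate ((wrap_count.toNat - vector.length % wrap_count.toNat) % wrap_count.toNat) (pad_with.getD 0))
          wrap_count.toNat := by
  unfold wrap_rows_alt
  rw [if_neg (by omega)]
  have hpad : (PySem.Int.mod (wrap_count - PySem.Int.mod ((vector.length : Nat) : Int) wrap_count) wrap_count).toNat
      = (wrap_count.toNat - vector.length % wrap_count.toNat) % wrap_count.toNat := by
    set w := wrap_count.toNat with hwdef
    have hcast : wrap_count = (w : Int) := by omega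
    rw [hcast, PySem.Int.mod_natCast]
    have hlt : vector.length % w < w := Nat.mod_lt _ (by omega)
    rw [show ((w : Int) - ((vector.length % w : Nat) : Int)) = (((w - vector.length % w : Nat)) : Int) by
      push_cast [Nat.cast_sub (le_of_lt hlt)]; ring]
    rw [PySem.Int.mod_natCast]
    omega
  show (PySem.List.pyRange 0 ((vector ++ List.replicate (PySem.Int.mod (wrap_count - PySem.Int.mod ((vector.length : Nat) : Int) wrap_count) wrap_count).toNat (pad_with.getD 0)).length : Int) wrap_count).map
      (fun i => PySem.List.slice (vector ++ List.replicate (PySem.Int.mod (wrap_count - PySem.Int.mod ((vector.length : Nat) : Int) wrap_count) wrap_count).toNat (pad_with.getD 0)) (some i) (some (i + wrap_count))) = _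
  rw [hpad]
  have := map_slice_eq_chunksG id
      (vector ++ List.replicate ((wrap_count.toNat - vector.length % wrap_count.toNat) % wrap_count.toNat) (pad_with.getD 0))
      wrap_count hw 0 le_rfl
  simpa using this

-- ===== VERDICT (by name: the statement is the Claim_ definition above) =====
theorem wrap_rows_spec : Claim_equal_wrap_rows := by
  intro vector wrap_count pad_with _hdom hpre
  obtain ⟨hw, -⟩ := hpre
  show wrap_rows vector wrap_count pad_with = wrap_rows_alt vector wrap_count pad_with
  rw [wrap_rows_eq vector wrap_count pad_with hw,
      wrap_rows_alt_eq vector wrap_count pad_with hw,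
      chunksG_pad_eq_raw (pad_with.getD 0) wrap_count.toNat (by omega) vector]
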